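-- pv_equiv track=rewrite | github.com/zifeishan/deepdive_ocr_app | script/naivefeature/uppercase.py | ChangeTime
-- ===== SOURCE A (Python) =====
-- def ChangeTime(word):
--   if len(word) == 0:
--     return 0
--   casechange = 0
--   last = word[0]
--   for char in word:
--     if last.islower() and char.isupper():
--       casechange += 1
--     last = char
--   # print casechange
--   return casechange
-- ===== SOURCE B (Python) =====
-- def ChangeTime(word):
--   # Divide and conquer: split the string in half, count transitions in each
--   # half recursively, add 1 if a transition straddles the split boundary.
--   if len(word) < 2:
--     return 0
--   mid = len(word) // 2
--   boundary = 1 if word[mid-1].islower() and word[mid].isupper() else 0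
--   return ChangeTime(word[:mid]) + ChangeTime(word[mid:]) + boundary
-- ===== Notes on version B (the rewrite author's own statement) =====
-- stated objective: alternative
-- what changed: Replaces A's single left-to-right pass with a lagged `last` variable by a divide-and-conquer recursion: split the string at the midpoint, recursively count transitions in each half, and add one if a lowercase-to-uppercase transition straddles the split boundary.
import Mathlib
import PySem

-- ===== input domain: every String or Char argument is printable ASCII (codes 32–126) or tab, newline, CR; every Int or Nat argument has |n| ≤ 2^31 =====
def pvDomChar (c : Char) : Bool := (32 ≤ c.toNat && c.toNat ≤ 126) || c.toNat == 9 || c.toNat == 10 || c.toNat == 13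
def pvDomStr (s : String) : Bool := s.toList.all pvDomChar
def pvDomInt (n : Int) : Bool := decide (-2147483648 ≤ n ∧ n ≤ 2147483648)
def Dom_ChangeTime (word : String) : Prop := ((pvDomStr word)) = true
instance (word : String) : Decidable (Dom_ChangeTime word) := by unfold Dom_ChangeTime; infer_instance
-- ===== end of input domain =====

-- B replaces A's single stateful pass (lagged `last` variable) by a divide-and-conquer
-- recursion on string halves; same result, a genuinely different traversal (objective: alternative).

-- c.islower() / c.isupper() for a single char; exact on the ASCII domain (Dom restricts
-- strings to printable ASCII + tab/newline/CR, where cased chars are exactly a-z / A-Z).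
def pyIsLowerChar (c : Char) : Bool := 'a' ≤ c && c ≤ 'z'
def pyIsUpperChar (c : Char) : Bool := 'A' ≤ c && c ≤ 'Z'

-- ===== PORT A =====
-- step of A's for-loop: state = (casechange, last)
def changeStepA (st : Int × Char) (ch : Char) : Int × Char :=
  (if pyIsLowerChar st.2 && pyIsUpperChar ch then st.1 + 1 else st.1, ch)

def ChangeTime (word : String) : Int :=
  match word.toList with
  | [] => 0
  | c :: _ => (word.toList.foldl changeStepA (0, c)).1

-- ===== PORT B =====
-- Source B's recursion on the character list; word[mid-1] / word[mid] are always in range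
-- here (2 ≤ length, 1 ≤ mid ≤ length-1), so getD is an exact port of the indexing.
def dcCount (cs : List Char) : Int :=
  if cs.length < 2 then 0
  else
    dcCount (cs.take (cs.length / 2)) + dcCount (cs.drop (cs.length / 2)) +
      (if pyIsLowerChar (cs.getD (cs.length / 2 - 1) ' ') && pyIsUpperChar (cs.getD (cs.length / 2) ' ')
       then 1 else 0)
termination_by cs.length
decreasing_by
  · simp only [List.length_take]; omega
  · simp only [List.length_drop]; omega

def ChangeTime_alt (word : String) : Int := dcCount word.toList

-- ===== PRECONDITION & SPEC =====
def Spec_ChangeTime (word : String) (out : Int) : Prop := out = ChangeTime_alt word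
instance (word : String) (out : Int) : Decidable (Spec_ChangeTime word out) := by unfold Spec_ChangeTime; infer_instance

-- ===== CLAIM (what is proved, stated in full; the proofs are below) =====
def Claim_equal_ChangeTime : Prop := ∀ (word : String), Dom_ChangeTime word → Spec_ChangeTime word (ChangeTime word)

-- ===== LEMMAS AND PROOFS =====

-- adjacent-pair transition count, the common reference both ports are related to
def pairCount : List Char → Int
  | a :: b :: t => (if pyIsLowerChar a && pyIsUpperChar b then 1 else 0) + pairCount (b :: t)
  | _ => 0

-- no char is both lower- and uppercase, so A's self-comparison at the first iteration never counts
theorem not_lower_and_upper (c : Char) : (pyIsLowerChar c && pyIsUpperChar c) = false := by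
  simp only [pyIsLowerChar, pyIsUpperChar, Bool.and_eq_true,
    decide_eq_true_eq, Char.le_def, UInt32.le_iff_toNat_le, Decidable.not_and_iff_not_or_not,
    not_le, ← Bool.not_eq_true]
  have ha : ('a' : Char).val.toNat = 97 := by decide
  have hz : ('z' : Char).val.toNat = 122 := by decide
  have hA : ('A' : Char).val.toNat = 65 := by decide
  have hZ : ('Z' : Char).val.toNat = 90 := by decide
  rw [ha, hz, hA, hZ]
  omega

-- loop invariant for A's fold
theorem foldA_count (cs : List Char) (last : Char) (acc : Int) :
    (cs.foldl changeStepA (acc, last)).1 = acc + pairCount (last :: cs) := by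
  induction cs generalizing last acc with
  | nil => simp [pairCount]
  | cons a cs ih =>
    simp only [List.foldl_cons, changeStepA]
    rw [ih]
    show _ = acc + pairCount (last :: a :: cs)
    by_cases h : (pyIsLowerChar last && pyIsUpperChar a) = true <;> (simp [pairCount, h]; try ring)

-- splitting lemma: pairCount over a concatenation = the two halves plus the boundary pair
theorem pairCount_split (l m : List Char) (hl : l ≠ []) (hm : m ≠ []) :
    pairCount (l ++ m) =
      pairCount l +
      (if pyIsLowerChar (l.getLast hl) && pyIsUpperChar (m.head hm) then 1 else 0) +
      pairCount m := by
  induction l with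
  | nil => exact absurd rfl hl
  | cons a l ih =>
    cases l with
    | nil =>
      cases m with
      | nil => exact absurd rfl hm
      | cons b t => simp [pairCount]
    | cons c l' =>
      have h := ih (by simp)
      simp only [List.cons_append, pairCount] at *
      rw [h]
      simp [List.getLast_cons]
      ring

-- B's divide-and-conquer recursion computes pairCount
theorem dc_eq_pair : ∀ (n : Nat) (cs : List Char), cs.length ≤ n → dcCount cs = pairCount cs := by
  intro n
  induction n with
  | zero =>
    intro cs h
    have : cs = [] := List.eq_nil_of_length_eq_zero (by omega)
    subst this; simp [dcCount, pairCount]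
  | succ n ih =>
    intro cs h
    rw [dcCount]
    by_cases hlt : cs.length < 2
    · rw [if_pos hlt]
      match cs, hlt with
      | [], _ => rfl
      | [_], _ => rfl
    · rw [if_neg hlt]
      rw [Nat.not_lt] at hlt
      have h1 : 1 ≤ cs.length / 2 := by omega
      have h2 : cs.length / 2 < cs.length := by omega
      have hmlt : cs.length / 2 - 1 < cs.length := by omega
      rw [ih (cs.take (cs.length / 2)) (by rw [List.length_take]; omega), ih (cs.drop (cs.length / 2)) (by rw [List.length_drop]; omega)]
      have htake : cs.take (cs.length / 2) ≠ [] := by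
        intro he
        rcases List.take_eq_nil_iff.mp he with h' | h'
        · omega
        · rw [h'] at hlt; simp at hlt
      have hdrop : cs.drop (cs.length / 2) ≠ [] := by
        intro he
        have := List.drop_eq_nil_iff.mp he
        omega
      have hsplit := pairCount_split (cs.take (cs.length / 2)) (cs.drop (cs.length / 2)) htake hdrop
      rw [List.take_append_drop] at hsplit
      rw [hsplit]
      have hlast : (cs.take (cs.length / 2)).getLast htake = cs.getD (cs.length / 2 - 1) ' ' := by
        rw [List.getLast_eq_getElem]
        have hl : (cs.take (cs.length / 2)).length = cs.length / 2 := by simp; omega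
        rw [List.getD_eq_getElem _ _ hmlt]
        simp only [hl]
        rw [List.getElem_take]
      have hhead : (cs.drop (cs.length / 2)).head hdrop = cs.getD (cs.length / 2) ' ' := by
        rw [List.head_eq_getElem]
        rw [List.getD_eq_getElem _ _ h2]
        simp [List.getElem_drop]
      rw [hlast, hhead]
      ring

-- ===== VERDICT (by name: the statement is the Claim_ definition above) =====
theorem ChangeTime_spec : Claim_equal_ChangeTime := by
  intro word _
  unfold Spec_ChangeTime ChangeTime ChangeTime_alt
  rw [dc_eq_pair word.toList.length word.toList le_rfl]
  cases h : word.toList with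
  | nil => simp [pairCount]
  | cons c rest =>
    show (List.foldl changeStepA (0, c) (c :: rest)).1 = pairCount (c :: rest)
    rw [foldA_count]
    cases rest with
    | nil => simp [pairCount, not_lower_and_upper]
    | cons b t => simp [pairCount, not_lower_and_upper]
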